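-- pv_equiv track=rewrite | github.com/matijap59/Problem-pravljenja-rasporeda-Genetski-Algoritam | GenetskiAlgoritamProjekat.py | mar
-- ===== SOURCE A (Python) =====
-- def mar(raspored,pocinjanje):
--     for i in range(0,len(raspored),1):
--         danIuc=raspored[i]
--         if danIuc==[] and pocinjanje[i]!=None:
--             for j in range(i+1,len(pocinjanje),1):
--                 if pocinjanje[j]==None:
--                     pocinjanje[i],pocinjanje[j]=pocinjanje[j],pocinjanje[i]
--     for i in range(0,len(raspored),1):
--         if raspored[i]==[]:
--             pocinjanje[i]=None
--     return raspored,pocinjanje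
-- ===== SOURCE B (Python) =====
-- # B: single forward pointer over the next available None slot instead of
-- # rescanning the tail for each empty day (no redundant None-None swaps).
-- # Like A, mutates pocinjanje in place and returns the same objects.
-- def mar(raspored, pocinjanje):
--     j = 0
--     for i, dan in enumerate(raspored):
--         if dan == [] and pocinjanje[i] is not None:
--             if j < i + 1:
--                 j = i + 1
--             while j < len(pocinjanje) and pocinjanje[j] is not None:
--                 j += 1
--             if j < len(pocinjanje):
--                 pocinjanje[j] = pocinjanje[i]
--     for i, dan in enumerate(raspored):
--         if dan == []:
--             pocinjanje[i] = None
--     return raspored, pocinjanje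
-- ===== Notes on version B (the rewrite author's own statement) =====
-- stated objective: alternative
-- what changed: Replaced A's inner rescan of the whole tail for each empty slot (plus its redundant None-None swaps) by a single monotone forward pointer to the next free None slot; a timing run found no measurable speed difference on the generated inputs.
import Mathlib
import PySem

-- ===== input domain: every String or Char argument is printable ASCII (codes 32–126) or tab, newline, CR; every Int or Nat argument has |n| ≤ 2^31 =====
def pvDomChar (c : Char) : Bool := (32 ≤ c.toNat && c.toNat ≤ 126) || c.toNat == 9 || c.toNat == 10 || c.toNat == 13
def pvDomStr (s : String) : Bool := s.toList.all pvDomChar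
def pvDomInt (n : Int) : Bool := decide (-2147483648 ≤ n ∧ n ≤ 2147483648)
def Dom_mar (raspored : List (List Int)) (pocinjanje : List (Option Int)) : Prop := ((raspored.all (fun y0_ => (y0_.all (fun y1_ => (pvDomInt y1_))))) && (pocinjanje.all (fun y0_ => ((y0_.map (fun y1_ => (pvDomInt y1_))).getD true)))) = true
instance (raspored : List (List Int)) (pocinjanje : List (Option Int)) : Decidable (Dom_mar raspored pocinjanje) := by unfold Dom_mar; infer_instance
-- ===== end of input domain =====

-- B replaces A's inner rescan of the tail for each empty slot by one monotone
-- forward pointer to the next free None slot (objective: alternative).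
-- Both Pythons mutate `pocinjanje` in place; the equivalence proved here is
-- about the RETURN value only.

-- ===== PORT A =====
-- pocinjanje[i],pocinjanje[j]=pocinjanje[j],pocinjanje[i]
def marSwap (p : List (Option Int)) (i j : Nat) : List (Option Int) :=
  (p.set i (p.getD j none)).set j (p.getD i none)

-- the inner 'for j in range(i+1,len(pocinjanje),1)' loop
def marInner (p : List (Option Int)) (i : Nat) : List (Option Int) :=
  (List.range' (i+1) (p.length - (i+1))).foldl
    (fun q j => if q.getD j none = none then marSwap q i j else q) p

-- first 'for i in range(0,len(raspored),1)' loop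
def marPass1 (raspored : List (List Int)) (p0 : List (Option Int)) : List (Option Int) :=
  (List.range' 0 raspored.length).foldl
    (fun p i => if raspored.getD i [] = [] ∧ p.getD i none ≠ none then marInner p i else p) p0

-- second 'for i in range(0,len(raspored),1)' loop
def marPass2 (raspored : List (List Int)) (p0 : List (Option Int)) : List (Option Int) :=
  (List.range' 0 raspored.length).foldl
    (fun p i => if raspored.getD i [] = [] then p.set i none else p) p0

-- indexing via getD: Pre_mar guarantees every index A actually reads is in range
def mar (raspored : List (List Int)) (pocinjanje : List (Option Int)) : List (List Int) × List (Option Int) :=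
  (raspored, marPass2 raspored (marPass1 raspored pocinjanje))

-- ===== PORT B =====
-- 'while j < len(pocinjanje) and pocinjanje[j] is not None: j += 1'
def marSkip (p : List (Option Int)) (j : Nat) : Nat :=
  if _h : j < p.length then
    if p.getD j none ≠ none then marSkip p (j+1) else j
  else j
termination_by p.length - j

-- 'for i, dan in enumerate(raspored)' carrying (pocinjanje, j)
def marAltPass1 (raspored : List (List Int)) (p0 : List (Option Int)) : List (Option Int) :=
  (raspored.zipIdx.foldl
    (fun (t : List (Option Int) × Nat) di =>
      if di.1 = [] ∧ t.1.getD di.2 none ≠ none then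
        let j0 := if t.2 < di.2 + 1 then di.2 + 1 else t.2
        let j1 := marSkip t.1 j0
        (if j1 < t.1.length then t.1.set j1 (t.1.getD di.2 none) else t.1, j1)
      else t) (p0, 0)).1

-- second 'for i, dan in enumerate(raspored)' loop
def marAltPass2 (raspored : List (List Int)) (p0 : List (Option Int)) : List (Option Int) :=
  raspored.zipIdx.foldl (fun p di => if di.1 = [] then p.set di.2 none else p) p0

def mar_alt (raspored : List (List Int)) (pocinjanje : List (Option Int)) : List (List Int) × List (Option Int) :=
  (raspored, marAltPass2 raspored (marAltPass1 raspored pocinjanje))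

-- ===== PRECONDITION & SPEC =====
-- A (and B) raises IndexError iff some empty schedule slot has no starting-time
-- slot: an index i with raspored[i]==[] and i >= len(pocinjanje). Pre_ excludes
-- exactly those inputs; A returns on all others.
def Pre_mar (raspored : List (List Int)) (pocinjanje : List (Option Int)) : Prop :=
  ∀ di ∈ raspored.zipIdx, di.1 = [] → di.2 < pocinjanje.length
instance (raspored : List (List Int)) (pocinjanje : List (Option Int)) : Decidable (Pre_mar raspored pocinjanje) := by unfold Pre_mar; infer_instance
def pvWitness_mar : List (List Int) × List (Option Int) := ([[], [1]], [some 2, none])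

def Spec_mar (raspored : List (List Int)) (pocinjanje : List (Option Int)) (out : List (List Int) × List (Option Int)) : Prop := out = mar_alt raspored pocinjanje
instance (raspored : List (List Int)) (pocinjanje : List (Option Int)) (out : List (List Int) × List (Option Int)) : Decidable (Spec_mar raspored pocinjanje out) := by unfold Spec_mar; infer_instance

-- ===== CLAIM (what is proved, stated in full; the proofs are below) =====
def Claim_equal_mar : Prop := ∀ (raspored : List (List Int)) (pocinjanje : List (Option Int)), Dom_mar raspored pocinjanje → Pre_mar raspored pocinjanje → Spec_mar raspored pocinjanje (mar raspored pocinjanje)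

-- ===== LEMMAS AND PROOFS =====

lemma getD_set (p : List (Option Int)) (n q : Nat) (v : Option Int) :
    (p.set n v).getD q none = if n = q ∧ n < p.length then v else p.getD q none := by
  simp only [List.getD_eq_getElem?_getD, List.getElem?_set]
  split <;> split <;> simp_all

lemma getD_lt_length {p : List (Option Int)} {n : Nat} (h : p.getD n none ≠ none) :
    n < p.length := by
  by_contra hn
  simp [List.getD_eq_getElem?_getD, List.getElem?_eq_none (by omega : p.length ≤ n)] at h

lemma set_none_self {p : List (Option Int)} {n : Nat} (h : p.getD n none = none) :
    p.set n none = p := by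
  apply List.ext_getElem?
  intro q
  rw [List.getElem?_set]
  split
  · subst q
    by_cases hl : n < p.length
    · rw [List.getD_eq_getElem?_getD] at h
      rw [List.getElem?_eq_getElem hl] at h ⊢
      simp at h
      simp [hl, h]
    · simp [hl]
  · rfl

lemma foldl_id {α β : Type} {f : α → β → α} {a : α} {l : List β}
    (h : ∀ x ∈ l, f a x = a) : l.foldl f a = a := by
  induction l with
  | nil => rfl
  | cons x xs ih =>
      simp only [List.foldl_cons, h x (by simp)]
      exact ih (fun y hy => h y (by simp [hy]))

lemma foldl_length {α : Type} {f : List α → Nat → List α} {l : List Nat} {a : List α}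
    (h : ∀ b i, (f b i).length = b.length) : (l.foldl f a).length = a.length := by
  induction l generalizing a with
  | nil => rfl
  | cons x xs ih => simp [List.foldl_cons, ih, h]

lemma marSkip_ge (p : List (Option Int)) (j : Nat) : j ≤ marSkip p j := by
  fun_induction marSkip with
  | case1 j h hne ih => omega
  | case2 j h hne => omega
  | case3 j h => omega

lemma marSkip_mid (p : List (Option Int)) (j : Nat) :
    ∀ q, j ≤ q → q < marSkip p j → p.getD q none ≠ none := by
  fun_induction marSkip with
  | case1 j h hne ih =>
      intro q hq1 hq2
      rcases Nat.eq_or_lt_of_le hq1 with rfl | h'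
      · exact hne
      · exact ih q h' hq2
  | case2 j h hne => intro q h1 h2; omega
  | case3 j h => intro q h1 h2; omega

lemma marSkip_none (p : List (Option Int)) (j : Nat) (h : marSkip p j < p.length) :
    p.getD (marSkip p j) none = none := by
  fun_induction marSkip with
  | case1 j hlt hne ih => exact ih h
  | case2 j hlt hne => simpa using hne
  | case3 j hlt => omega

lemma marInner_no_none (p : List (Option Int)) (i : Nat)
    (h : ∀ q, i + 1 ≤ q → q < p.length → p.getD q none ≠ none) : marInner p i = p := by
  unfold marInner
  apply foldl_id
  intro x hx
  rw [List.mem_range'_1] at hx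
  rw [if_neg]
  exact h x hx.1 (by omega)

lemma marInner_first (p : List (Option Int)) (i q : Nat)
    (hi : p.getD i none ≠ none) (hq1 : i + 1 ≤ q) (hq2 : q < p.length)
    (hqn : p.getD q none = none)
    (hmin : ∀ r, i + 1 ≤ r → r < q → p.getD r none ≠ none) :
    marInner p i = (p.set i none).set q (p.getD i none) := by
  have hilen : i < p.length := getD_lt_length hi
  have hsplit : List.range' (i+1) (p.length - (i+1))
      = List.range' (i+1) (q-(i+1)) ++ q :: List.range' (q+1) (p.length-(q+1)) := by
    have h1 : List.range' (i+1) (q-(i+1)) ++ List.range' ((i+1)+1*(q-(i+1))) (p.length - q)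
        = List.range' (i+1) ((q-(i+1)) + (p.length - q)) := List.range'_append
    have e1 : (i+1)+1*(q-(i+1)) = q := by omega
    have e2 : (q-(i+1)) + (p.length - q) = p.length - (i+1) := by omega
    rw [e1, e2] at h1
    rw [← h1]
    congr 1
    have e3 : p.length - q = (p.length - (q+1)) + 1 := by omega
    rw [e3, List.range'_succ]
  unfold marInner
  rw [hsplit, List.foldl_append]
  have hpre : (List.range' (i+1) (q-(i+1))).foldl
      (fun q' j => if q'.getD j none = none then marSwap q' i j else q') p = p := by
    apply foldl_id
    intro x hx
    rw [List.mem_range'_1] at hx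
    rw [if_neg]
    exact hmin x hx.1 (by omega)
  rw [hpre]
  simp only [List.foldl_cons]
  rw [if_pos hqn]
  have hswap : marSwap p i q = (p.set i none).set q (p.getD i none) := by
    unfold marSwap; rw [hqn]
  rw [hswap]
  set p' := (p.set i none).set q (p.getD i none) with hp'
  have hpi : p'.getD i none = none := by
    rw [hp', getD_set, if_neg (by omega), getD_set, if_pos ⟨rfl, hilen⟩]
  apply foldl_id
  intro r hr
  rw [List.mem_range'_1] at hr
  by_cases hrn : p'.getD r none = none
  · rw [if_pos hrn]
    unfold marSwap
    rw [hrn, hpi, set_none_self hpi, set_none_self hrn]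
  · rw [if_neg hrn]

lemma zipIdx_foldl_eq {γ : Type} (f : γ → List Int → Nat → γ) :
    ∀ (xs : List (List Int)) (s : Nat) (a : γ),
      (xs.zipIdx s).foldl (fun acc di => f acc di.1 di.2) a
        = (List.range' s xs.length).foldl (fun acc i => f acc (xs.getD (i - s) []) i) a := by
  intro xs
  induction xs with
  | nil => intro s a; rfl
  | cons x xs ih =>
      intro s a
      rw [List.zipIdx_cons, List.length_cons, List.range'_succ, List.foldl_cons, List.foldl_cons]
      have e0 : (x::xs).getD (s - s) [] = x := by
        rw [Nat.sub_self]; rfl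
      rw [e0, ih (s+1) (f a x s)]
      apply PySem.List.foldl_congr_mem
      intro acc i hi
      rw [List.mem_range'_1] at hi
      have e1 : i - s = (i - (s+1)) + 1 := by omega
      rw [e1, List.getD_cons_succ]

-- A's and B's pass-1 step functions (proof-side names for the ports' loop bodies)
def stepA (raspored : List (List Int)) : List (Option Int) → Nat → List (Option Int) :=
  fun p i => if raspored.getD i [] = [] ∧ p.getD i none ≠ none then marInner p i else p

def stepB (raspored : List (List Int)) : (List (Option Int) × Nat) → Nat → (List (Option Int) × Nat) :=
  fun t i =>
    if raspored.getD i [] = [] ∧ t.1.getD i none ≠ none then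
      (let j0 := if t.2 < i + 1 then i + 1 else t.2
       let j1 := marSkip t.1 j0
       (if j1 < t.1.length then t.1.set j1 (t.1.getD i none) else t.1, j1))
    else t

-- simulation of A's pass 1 by B's pass 1
lemma pass1_sim (raspored : List (List Int)) :
    ∀ (cnt s : Nat) (pA pB : List (Option Int)) (j : Nat),
      s + cnt ≤ raspored.length →
      pA.length = pB.length →
      (∀ q, s ≤ q → pA.getD q none = pB.getD q none) →
      (∀ q, pA.getD q none = pB.getD q none ∨ (q < raspored.length ∧ raspored.getD q [] = [])) →
      (∀ q, s ≤ q → q < j → q < pB.length → pB.getD q none ≠ none) →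
      ((List.range' s cnt).foldl (stepA raspored) pA).length
          = ((List.range' s cnt).foldl (stepB raspored) (pB, j)).1.length ∧
        ∀ q, ((List.range' s cnt).foldl (stepA raspored) pA).getD q none
              = ((List.range' s cnt).foldl (stepB raspored) (pB, j)).1.getD q none
            ∨ (q < raspored.length ∧ raspored.getD q [] = []) := by
  intro cnt
  induction cnt with
  | zero =>
      intro s pA pB j hle hlen hhi hall hptr
      exact ⟨hlen, hall⟩
  | succ cnt ih =>
      intro s pA pB j hle hlen hhi hall hptr
      rw [List.range'_succ, List.foldl_cons, List.foldl_cons]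
      have hs : pA.getD s none = pB.getD s none := hhi s (Nat.le_refl s)
      by_cases hc : raspored.getD s [] = [] ∧ pB.getD s none ≠ none
      · -- the step fires in both programs
        have hcA : raspored.getD s [] = [] ∧ pA.getD s none ≠ none := ⟨hc.1, hs ▸ hc.2⟩
        have hsA : stepA raspored pA s = marInner pA s := by
          unfold stepA; rw [if_pos hcA]
        have hsBlen : s < pB.length := getD_lt_length hc.2
        -- unfold B's step
        set j0 : Nat := if j < s + 1 then s + 1 else j with hj0def
        set j1 : Nat := marSkip pB j0 with hj1def
        have hsB : stepB raspored (pB, j) s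
            = (if j1 < pB.length then pB.set j1 (pB.getD s none) else pB, j1) := by
          unfold stepB; rw [if_pos hc]
        have hj0ge : s + 1 ≤ j0 := by rw [hj0def]; split <;> omega
        have hj1ge : j0 ≤ j1 := hj1def ▸ marSkip_ge pB j0
        have hpre : ∀ q, s + 1 ≤ q → q < j0 → q < pB.length → pB.getD q none ≠ none := by
          intro q h1 h2 h3
          rw [hj0def] at h2
          by_cases hj : j < s + 1
          · rw [if_pos hj] at h2; omega
          · rw [if_neg hj] at h2
            exact hptr q (by omega) h2 h3
        have hfree : ∀ q, s + 1 ≤ q → q < j1 → q < pB.length → pB.getD q none ≠ none := by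
          intro q h1 h2 h3
          by_cases hq : q < j0
          · exact hpre q h1 hq h3
          · exact marSkip_mid pB j0 q (by omega) (hj1def ▸ h2)
        have hsrasp : s < raspored.length := by omega
        by_cases hfill : j1 < pB.length
        · -- a free slot exists: A swaps there, B writes there
          have hBnone : pB.getD j1 none = none := hj1def ▸ marSkip_none pB j0 (hj1def ▸ hfill)
          have hAnone : pA.getD j1 none = none := by
            rw [hhi j1 (by omega)]; exact hBnone
          have hinner : marInner pA s = (pA.set s none).set j1 (pA.getD s none) :=
            marInner_first pA s j1 hcA.2 (by omega) (by omega) hAnone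
              (fun r h1 h2 => by
                rw [hhi r (by omega)]
                exact hfree r h1 h2 (by omega))
          rw [hsA, hinner, hsB, if_pos hfill]
          apply ih (s+1) _ _ j1 (by omega)
          · simp [hlen]
          · intro q hq
            by_cases hq1 : j1 = q
            · subst hq1
              rw [getD_set, if_pos ⟨rfl, by simp only [List.length_set]; omega⟩,
                getD_set, if_pos ⟨rfl, hfill⟩, hs]
            · rw [getD_set, if_neg (fun h => hq1 h.1),
                getD_set, if_neg (by rintro ⟨rfl, -⟩; omega),
                getD_set, if_neg (fun h => hq1 h.1)]
              exact hhi q (by omega)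
          · intro q
            by_cases hq1 : j1 = q
            · left
              subst hq1
              rw [getD_set, if_pos ⟨rfl, by simp only [List.length_set]; omega⟩,
                getD_set, if_pos ⟨rfl, hfill⟩, hs]
            · by_cases hq2 : s = q
              · right; exact ⟨by omega, hq2 ▸ hc.1⟩
              · rw [getD_set, if_neg (fun h => hq1 h.1),
                  getD_set, if_neg (fun h => hq2 h.1),
                  getD_set, if_neg (fun h => hq1 h.1)]
                exact hall q
          · intro q h1 h2 h3
            rw [getD_set, if_neg (by rintro ⟨rfl, -⟩; omega)]
            rw [List.length_set] at h3
            exact hfree q h1 h2 h3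
        · -- no free slot: A's inner loop is a no-op, B only moves the pointer
          have hinner : marInner pA s = pA := by
            apply marInner_no_none
            intro q h1 h2
            rw [hhi q (by omega)]
            exact hfree q h1 (by omega) (by omega)
          rw [hsA, hinner, hsB, if_neg hfill]
          apply ih (s+1) _ _ j1 (by omega) hlen
          · intro q hq; exact hhi q (by omega)
          · exact hall
          · intro q h1 h2 h3
            exact hfree q h1 h2 h3
      · -- the step is skipped in both programs
        have hcA : ¬ (raspored.getD s [] = [] ∧ pA.getD s none ≠ none) := by
          rw [hs]; exact hc
        have hsA : stepA raspored pA s = pA := by unfold stepA; rw [if_neg hcA]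
        have hsB : stepB raspored (pB, j) s = (pB, j) := by unfold stepB; rw [if_neg hc]
        rw [hsA, hsB]
        apply ih (s+1) _ _ j (by omega) hlen
        · intro q hq; exact hhi q (by omega)
        · exact hall
        · intro q h1 h2 h3; exact hptr q (by omega) h2 h3

lemma pass2_getD (raspored : List (List Int)) :
    ∀ (cnt s : Nat) (p : List (Option Int)) (q : Nat),
      ((List.range' s cnt).foldl
          (fun p i => if raspored.getD i [] = [] then p.set i none else p) p).getD q none
        = if s ≤ q ∧ q < s + cnt ∧ raspored.getD q [] = [] then none else p.getD q none := by
  intro cnt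
  induction cnt with
  | zero =>
      intro s p q
      rw [if_neg (by omega : ¬(s ≤ q ∧ q < s + 0 ∧ raspored.getD q [] = []))]
      rfl
  | succ cnt ih =>
      intro s p q
      rw [List.range'_succ, List.foldl_cons, ih]
      by_cases h1 : (s+1) ≤ q ∧ q < (s+1) + cnt ∧ raspored.getD q [] = []
      · rw [if_pos h1, if_pos ⟨by omega, by omega, h1.2.2⟩]
      · rw [if_neg h1]
        by_cases hcs : raspored.getD s [] = []
        · rw [if_pos hcs, getD_set]
          split_ifs with hA hB hB
          · rfl
          · rcases hA with ⟨rfl, hl⟩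
            exact absurd ⟨Nat.le_refl s, by omega, hcs⟩ hB
          · rcases hB with ⟨hb1, hb2, hb3⟩
            by_cases hsq : s = q
            · subst hsq
              exact List.getD_eq_default _ _ (by
                by_contra hlen
                exact hA ⟨rfl, by omega⟩)
            · exact absurd ⟨by omega, by omega, hb3⟩ h1
          · rfl
        · rw [if_neg hcs]
          rw [if_neg (by
            rintro ⟨ha, hb, hc⟩
            by_cases hsq : s = q
            · exact hcs (hsq ▸ hc)
            · exact h1 ⟨by omega, by omega, hc⟩)]

lemma pass2_length (raspored : List (List Int)) (cnt s : Nat) (p : List (Option Int)) :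
    ((List.range' s cnt).foldl
        (fun p i => if raspored.getD i [] = [] then p.set i none else p) p).length = p.length := by
  apply foldl_length; intro b i; split <;> simp

lemma ext_of_getD {p q : List (Option Int)} (hlen : p.length = q.length)
    (h : ∀ n, p.getD n none = q.getD n none) : p = q := by
  apply List.ext_getElem?
  intro n
  by_cases hn : n < p.length
  · rw [List.getElem?_eq_getElem hn, List.getElem?_eq_getElem (hlen ▸ hn)]
    have hd := h n
    rw [List.getD_eq_getElem _ _ hn, List.getD_eq_getElem _ _ (hlen ▸ hn)] at hd
    rw [hd]
  · rw [List.getElem?_eq_none (by omega), List.getElem?_eq_none (by omega)]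

lemma marPass1_eq (raspored : List (List Int)) (p0 : List (Option Int)) :
    marPass1 raspored p0 = (List.range' 0 raspored.length).foldl (stepA raspored) p0 := rfl

lemma marAltPass1_eq (raspored : List (List Int)) (p0 : List (Option Int)) :
    marAltPass1 raspored p0
      = ((List.range' 0 raspored.length).foldl (stepB raspored) (p0, 0)).1 := by
  unfold marAltPass1
  rw [zipIdx_foldl_eq (fun t d i =>
    if d = [] ∧ t.1.getD i none ≠ none then
      (let j0 := if t.2 < i + 1 then i + 1 else t.2
       let j1 := marSkip t.1 j0
       (if j1 < t.1.length then t.1.set j1 (t.1.getD i none) else t.1, j1))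
    else t) raspored 0 (p0, 0)]
  simp only [Nat.sub_zero]
  rfl

lemma marAltPass2_eq (raspored : List (List Int)) (p0 : List (Option Int)) :
    marAltPass2 raspored p0
      = (List.range' 0 raspored.length).foldl
          (fun p i => if raspored.getD i [] = [] then p.set i none else p) p0 := by
  unfold marAltPass2
  rw [zipIdx_foldl_eq (fun p d i => if d = [] then p.set i none else p) raspored 0 p0]
  simp only [Nat.sub_zero]

-- ===== VERDICT (by name: the statement is the Claim_ definition above) =====
theorem mar_spec : Claim_equal_mar := by
  unfold Claim_equal_mar
  intro raspored pocinjanje _hdom _hpre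
  unfold Spec_mar mar mar_alt
  refine Prod.ext rfl ?_
  show marPass2 raspored (marPass1 raspored pocinjanje)
      = marAltPass2 raspored (marAltPass1 raspored pocinjanje)
  obtain ⟨hlen, hall⟩ := pass1_sim raspored raspored.length 0 pocinjanje pocinjanje 0
    (by omega) rfl (fun q _ => rfl) (fun q => Or.inl rfl) (fun q _ h _ => by omega)
  rw [marPass1_eq, marAltPass1_eq, marAltPass2_eq]
  unfold marPass2
  apply ext_of_getD
  · rw [pass2_length, pass2_length]
    exact hlen
  · intro q
    rw [pass2_getD, pass2_getD]
    by_cases hq : 0 ≤ q ∧ q < 0 + raspored.length ∧ raspored.getD q [] = []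
    · rw [if_pos hq, if_pos hq]
    · rw [if_neg hq, if_neg hq]
      rcases hall q with h | h
      · exact h
      · exact absurd ⟨by omega, by omega, h.2⟩ hq
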